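-- pv_equiv track=rewrite | github.com/dalton-developer/Proyecto-Inteligencia-Ambiental | aplicacionCliente/aplicacionCliente/main.py | generate_map_matrix
-- ===== SOURCE A (Python) =====
-- def generate_map_matrix(map_data):
--     map_matrix = []
--     for i in range(0, len(map_data), 2):
--         number = map_data[i:i+2]
--         row_index = i // 10
--         col_index = i % 10 // 2
--         if row_index >= 7 or col_index >= 5:
--             break
--         if not map_matrix:
--             map_matrix = [[number]]
--         elif col_index == 0:
--             map_matrix.append([number])
--         else:
--             map_matrix[row_index].append(number)
--     return map_matrix
-- ===== SOURCE B (Python) =====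
-- def generate_map_matrix(map_data):
--     data = map_data[:70]
--     return [_chunk_row(data[r:r+10]) for r in range(0, len(data), 10)]
--
--
-- def _chunk_row(row):
--     return [row[c:c+2] for c in range(0, len(row), 2)]
-- ===== Notes on version B (the rewrite author's own statement) =====
-- stated objective: simpler
-- what changed: Replaces the flat per-chunk loop with row/col index arithmetic and new-row/append branching by capping the input at 70 characters and reshaping it with a nested rows-of-10 / chunks-of-2 slicing comprehension.
import Mathlib
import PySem

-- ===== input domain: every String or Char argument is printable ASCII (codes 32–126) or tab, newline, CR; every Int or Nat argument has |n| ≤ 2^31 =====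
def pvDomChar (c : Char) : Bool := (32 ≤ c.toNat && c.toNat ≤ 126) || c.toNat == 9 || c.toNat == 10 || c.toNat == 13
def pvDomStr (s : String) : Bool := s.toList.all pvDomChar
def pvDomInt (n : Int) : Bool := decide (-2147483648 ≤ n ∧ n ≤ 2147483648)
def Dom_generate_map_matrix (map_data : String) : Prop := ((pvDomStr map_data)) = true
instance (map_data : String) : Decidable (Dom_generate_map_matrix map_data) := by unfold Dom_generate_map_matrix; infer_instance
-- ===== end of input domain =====

-- B caps the input at 70 characters and reshapes it by nested rows-of-10 / chunks-of-2 slicing,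
-- replacing A's flat per-chunk loop with index arithmetic and new-row branching (objective: simpler).


-- ===== PORT A =====
-- the loop over range(0, len(map_data), 2), with the break returning the accumulator;
-- row_index.toNat is safe: i comes from range(0,…,2) so i ≥ 0, and Python's
-- map_matrix[row_index] is always in range when that branch runs (row_index = len-1).
def aLoop (map_data : String) : List Int → List (List String) → List (List String)
  | [], mm => mm
  | i :: rest, mm =>
    let number := PySem.Str.slice map_data (some i) (some (i + 2))
    let row_index := PySem.Int.floordiv i 10
    let col_index := PySem.Int.floordiv (PySem.Int.mod i 10) 2
    if 7 ≤ row_index ∨ 5 ≤ col_index then mm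
    else if mm = [] then aLoop map_data rest [[number]]
    else if col_index = 0 then aLoop map_data rest (mm ++ [[number]])
    else aLoop map_data rest (mm.modify row_index.toNat (fun row => row ++ [number]))

def generate_map_matrix (map_data : String) : List (List String) :=
  aLoop map_data (PySem.List.pyRange 0 (PySem.Str.len map_data) 2) []

-- ===== PORT B =====
def bChunkRow (row : String) : List String :=
  (PySem.List.pyRange 0 (PySem.Str.len row) 2).map
    (fun c => PySem.Str.slice row (some c) (some (c + 2)))

def generate_map_matrix_alt (map_data : String) : List (List String) :=
  let data := PySem.Str.slice map_data none (some 70)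
  (PySem.List.pyRange 0 (PySem.Str.len data) 10).map
    (fun r => bChunkRow (PySem.Str.slice data (some r) (some (r + 10))))

-- ===== PRECONDITION & SPEC =====
def Spec_generate_map_matrix (map_data : String) (out : List (List String)) : Prop := out = generate_map_matrix_alt map_data
instance (map_data : String) (out : List (List String)) : Decidable (Spec_generate_map_matrix map_data out) := by unfold Spec_generate_map_matrix; infer_instance

-- ===== CLAIM (what is proved, stated in full; the proofs are below) =====
def Claim_equal_generate_map_matrix : Prop := ∀ (map_data : String), Dom_generate_map_matrix map_data → Spec_generate_map_matrix map_data (generate_map_matrix map_data)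

-- ===== LEMMAS AND PROOFS =====

-- canonical form both ports are reduced to: rows of 10 chars, each split into 2-char chunks
def chunks2 : List Char → List String
  | [] => []
  | [a] => [String.ofList [a]]
  | a :: b :: rest => String.ofList [a, b] :: chunks2 rest

def rows10 (cs : List Char) : List (List String) :=
  if _hne : cs = [] then [] else chunks2 (cs.take 10) :: rows10 (cs.drop 10)
termination_by cs.length
decreasing_by
  have : 0 < cs.length := List.length_pos_iff.mpr _hne
  simp
  omega

theorem rows10_nil : rows10 [] = [] := by rw [rows10]; simp

theorem rows10_cons (cs : List Char) (h : cs ≠ []) :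
    rows10 cs = chunks2 (cs.take 10) :: rows10 (cs.drop 10) := by
  rw [rows10]; simp [h]

theorem rows10_small (cs : List Char) (h : cs ≠ []) (hl : cs.length ≤ 10) :
    rows10 cs = [chunks2 cs] := by
  rw [rows10_cons cs h, List.take_of_length_le hl, List.drop_of_length_le hl, rows10_nil]

theorem pyRange_step_nil (a b s : Int) (hs : 0 < s) (h : b ≤ a) :
    PySem.List.pyRange a b s = [] := by
  rw [PySem.List.pyRange_of_pos a b hs, if_neg (not_lt.mpr h)]
  simp

theorem pyRange_two_cons (a b : Int) (h : a < b) :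
    PySem.List.pyRange a b 2 = a :: PySem.List.pyRange (a + 2) b 2 := by
  rw [PySem.List.pyRange_of_pos a b (by norm_num),
      PySem.List.pyRange_of_pos (a + 2) b (by norm_num)]
  have hc : (if a < b then ((b - a + 2 - 1) / 2).toNat else 0)
      = (if a + 2 < b then ((b - (a + 2) + 2 - 1) / 2).toNat else 0) + 1 := by
    split <;> split <;> omega
  rw [hc, List.range_succ_eq_map, List.map_cons, List.map_map]
  congr 1
  · simp
  · apply List.map_congr_left; intro k _; simp [Function.comp]; ring

theorem pyRangeTwo (n : Nat) :
    PySem.List.pyRange 0 (n : Int) 2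
      = (List.range ((n + 1) / 2)).map (fun k => ((2 * k : Nat) : Int)) := by
  rw [PySem.List.pyRange_of_pos 0 n (by norm_num)]
  have hc : (if (0 : Int) < n then (((n : Int) - 0 + 2 - 1) / 2).toNat else 0) = (n + 1) / 2 := by
    split <;> omega
  rw [hc]
  apply List.map_congr_left; intro k _; push_cast; ring

theorem pyRangeTen (n : Nat) :
    PySem.List.pyRange 0 (n : Int) 10
      = (List.range ((n + 9) / 10)).map (fun k => ((10 * k : Nat) : Int)) := by
  rw [PySem.List.pyRange_of_pos 0 n (by norm_num)]
  have hc : (if (0 : Int) < n then (((n : Int) - 0 + 10 - 1) / 10).toNat else 0) = (n + 9) / 10 := by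
    split <;> omega
  rw [hc]
  apply List.map_congr_left; intro k _; push_cast; ring

theorem sliceStrList (s : String) (j n : Nat) :
    (PySem.Str.slice s (some (j : Int)) (some ((j : Int) + (n : Int)))).toList
      = (s.toList.drop j).take n := by
  rw [PySem.Str.toList_slice]
  simp [PySem.List.slice_natCast_add]

theorem sliceStrMk (s : String) (j n : Nat) :
    PySem.Str.slice s (some (j : Int)) (some ((j : Int) + (n : Int)))
      = String.ofList ((s.toList.drop j).take n) := by
  apply String.toList_inj.mp
  rw [sliceStrList]
  simp

theorem chunks2_take_succ (cs : List Char) (j : Nat) (h : 2 * j < cs.length) :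
    chunks2 (cs.take (2 * j + 2))
      = chunks2 (cs.take (2 * j)) ++ [String.ofList ((cs.drop (2 * j)).take 2)] := by
  induction j generalizing cs with
  | zero =>
    match cs, h with
    | [a], _ => simp [chunks2]
    | a :: b :: t, _ => simp [chunks2]
  | succ j ih =>
    match cs, h with
    | a :: b :: t, h =>
      have ht : 2 * j < t.length := by simp at h; omega
      have e1 : 2 * (j + 1) + 2 = (2 * j + 2) + 1 + 1 := by omega
      have e2 : 2 * (j + 1) = (2 * j) + 1 + 1 := by omega
      rw [e1, e2]
      simp only [List.take_succ_cons, List.drop_succ_cons]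
      rw [chunks2, chunks2, ih t ht]
      simp

theorem rows10_take_succ (cs : List Char) (j : Nat) (h : 2 * j < cs.length) :
    rows10 (cs.take (2 * j + 2))
      = if j % 5 = 0
        then rows10 (cs.take (2 * j)) ++ [[String.ofList ((cs.drop (2 * j)).take 2)]]
        else (rows10 (cs.take (2 * j))).modify (j / 5)
              (fun row => row ++ [String.ofList ((cs.drop (2 * j)).take 2)]) := by
  induction j using Nat.strong_induction_on generalizing cs with
  | _ j ih =>
  by_cases h5 : j < 5
  · have hne : cs.take (2 * j + 2) ≠ [] :=
      List.length_pos_iff.mp (by rw [List.length_take]; omega)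
    have hsm : (cs.take (2 * j + 2)).length ≤ 10 := by
      rw [List.length_take]; omega
    rw [rows10_small _ hne hsm, chunks2_take_succ cs j h]
    match j, h5 with
    | 0, _ =>
      simp [rows10_nil, chunks2]
    | (j' + 1), h5 =>
      have hmod : (j' + 1) % 5 ≠ 0 := by omega
      have hdiv : (j' + 1) / 5 = 0 := by omega
      rw [if_neg hmod, hdiv]
      have hne2 : cs.take (2 * (j' + 1)) ≠ [] :=
        List.length_pos_iff.mp (by rw [List.length_take]; omega)
      have hsm2 : (cs.take (2 * (j' + 1))).length ≤ 10 := by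
        rw [List.length_take]; omega
      rw [rows10_small _ hne2 hsm2]
      simp [List.modify_cons]
  · -- j ≥ 5 : peel one full row of 10 characters off the front
    have h10 : 10 ≤ 2 * j := by omega
    have hlen : 10 < cs.length := by omega
    have hne : cs.take (2 * j + 2) ≠ [] :=
      List.length_pos_iff.mp (by rw [List.length_take]; omega)
    have hne2 : cs.take (2 * j) ≠ [] :=
      List.length_pos_iff.mp (by rw [List.length_take]; omega)
    rw [rows10_cons _ hne, rows10_cons _ hne2]
    have t1 : (cs.take (2 * j + 2)).take 10 = cs.take 10 := by
      rw [List.take_take]; congr 1; omega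
    have t2 : (cs.take (2 * j)).take 10 = cs.take 10 := by
      rw [List.take_take]; congr 1; omega
    have d1 : (cs.take (2 * j + 2)).drop 10 = (cs.drop 10).take (2 * (j - 5) + 2) := by
      rw [List.drop_take]; congr 1; omega
    have d2 : (cs.take (2 * j)).drop 10 = (cs.drop 10).take (2 * (j - 5)) := by
      rw [List.drop_take]; congr 1; omega
    rw [t1, t2, d1, d2]
    have hrec : 2 * (j - 5) < (cs.drop 10).length := by
      rw [List.length_drop]; omega
    rw [ih (j - 5) (by omega) (cs.drop 10) hrec]
    have ddrop : (cs.drop 10).drop (2 * (j - 5)) = cs.drop (2 * j) := by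
      rw [List.drop_drop]; congr 1; omega
    have hm : j % 5 = (j - 5) % 5 := by omega
    have hd : j / 5 = (j - 5) / 5 + 1 := by omega
    rw [ddrop, ← hm, hd]
    by_cases hmod : j % 5 = 0
    · simp [hmod]
    · simp [hmod]

theorem rows10_eq_nil_iff (cs : List Char) : rows10 cs = [] ↔ cs = [] := by
  constructor
  · intro h
    by_contra hne
    rw [rows10_cons cs hne] at h
    exact List.cons_ne_nil _ _ h
  · intro h; rw [h, rows10_nil]

-- ===== A-side main lemma =====
theorem aLoop_eq (map_data : String) (k : Nat) :
    ∀ (j : Nat), k = 35 - j →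
    aLoop map_data (PySem.List.pyRange ((2 * j : Nat) : Int) (PySem.Str.len map_data) 2)
        (rows10 ((map_data.toList.take 70).take (2 * j)))
      = rows10 (map_data.toList.take 70) := by
  induction k with
  | zero =>
    intro j hk
    have hj : 35 ≤ j := by omega
    have hfull : (map_data.toList.take 70).take (2 * j) = map_data.toList.take 70 := by
      apply List.take_of_length_le
      rw [List.length_take]
      omega
    rw [PySem.Str.len_eq]
    by_cases hc : 2 * j < map_data.toList.length
    · rw [pyRange_two_cons _ _ (by exact_mod_cast hc)]
      simp only [aLoop]
      have hrow : PySem.Int.floordiv ((2 * j : Nat) : Int) 10 = ((2 * j / 10 : Nat) : Int) := by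
        exact_mod_cast PySem.Int.floordiv_natCast (2 * j) 10
      rw [hrow, if_pos (Or.inl (by exact_mod_cast Nat.cast_le.mpr (by omega : 7 ≤ 2 * j / 10)))]
      exact congrArg rows10 hfull
    · rw [pyRange_step_nil _ _ 2 (by norm_num) (by exact_mod_cast not_lt.mp hc)]
      simp only [aLoop]
      exact congrArg rows10 hfull
  | succ k ih =>
    intro j hk
    have hj : j < 35 := by omega
    rw [PySem.Str.len_eq]
    by_cases hc : 2 * j < map_data.toList.length
    · -- loop body runs: no break, one chunk is consumed
      have hcs_len : (map_data.toList.take 70).length = min 70 map_data.toList.length := by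
        rw [List.length_take]
      have hcsne : map_data.toList.take 70 ≠ [] :=
        List.length_pos_iff.mp (by rw [List.length_take]; omega)
      rw [pyRange_two_cons _ _ (by exact_mod_cast hc)]
      simp only [aLoop]
      have hrow : PySem.Int.floordiv ((2 * j : Nat) : Int) 10 = ((2 * j / 10 : Nat) : Int) := by
        exact_mod_cast PySem.Int.floordiv_natCast (2 * j) 10
      have hmod : PySem.Int.mod ((2 * j : Nat) : Int) 10 = ((2 * j % 10 : Nat) : Int) := by
        exact_mod_cast PySem.Int.mod_natCast (2 * j) 10
      have hcol : PySem.Int.floordiv ((2 * j % 10 : Nat) : Int) 2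
          = ((2 * j % 10 / 2 : Nat) : Int) := by
        exact_mod_cast PySem.Int.floordiv_natCast (2 * j % 10) 2
      rw [hrow, hmod, hcol]
      rw [if_neg (by
        rintro (h | h)
        · exact absurd (by exact_mod_cast h : (7 : Nat) ≤ 2 * j / 10) (by omega)
        · exact absurd (by exact_mod_cast h : (5 : Nat) ≤ 2 * j % 10 / 2) (by omega))]
      have hnum : PySem.Str.slice map_data (some ((2 * j : Nat) : Int))
            (some (((2 * j : Nat) : Int) + 2))
          = String.ofList ((map_data.toList.drop (2 * j)).take 2) := by
        have h := sliceStrMk map_data (2 * j) 2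
        rwa [show ((2 : Nat) : Int) = (2 : Int) from rfl] at h
      have hnumcs : ((map_data.toList.take 70).drop (2 * j)).take 2
          = (map_data.toList.drop (2 * j)).take 2 := by
        rw [List.drop_take, List.take_take]
        congr 1
        omega
      have hstep : rows10 ((map_data.toList.take 70).take (2 * (j + 1)))
          = if j % 5 = 0
            then rows10 ((map_data.toList.take 70).take (2 * j))
                  ++ [[String.ofList ((map_data.toList.drop (2 * j)).take 2)]]
            else (rows10 ((map_data.toList.take 70).take (2 * j))).modify (j / 5)
                  (fun row => row ++ [String.ofList ((map_data.toList.drop (2 * j)).take 2)]) := by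
        rw [show 2 * (j + 1) = 2 * j + 2 from by omega, ← hnumcs]
        exact rows10_take_succ (map_data.toList.take 70) j (by rw [List.length_take]; omega)
      have hrange : ((2 * j : Nat) : Int) + 2 = ((2 * (j + 1) : Nat) : Int) := by
        push_cast; ring
      have ihj := ih (j + 1) (by omega)
      rw [PySem.Str.len_eq] at ihj
      have hacc : rows10 ((map_data.toList.take 70).take (2 * j)) = [] ↔ j = 0 := by
        rw [rows10_eq_nil_iff, ← List.length_eq_zero_iff, List.length_take, List.length_take]
        omega
      by_cases hj0 : j = 0
      · rw [if_pos (hacc.mpr hj0), hnum]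
        subst hj0
        have hstep0 : [[String.ofList ((map_data.toList.drop (2 * 0)).take 2)]]
            = rows10 ((map_data.toList.take 70).take (2 * (0 + 1))) := by
          rw [hstep]
          simp [rows10_nil]
        rw [hstep0, hrange]
        exact ihj
      · rw [if_neg (fun h => hj0 (hacc.mp h)), hnum]
        by_cases h5 : j % 5 = 0
        · rw [if_pos (by exact_mod_cast congrArg (Nat.cast : Nat → Int) (by omega : 2 * j % 10 / 2 = 0))]
          have : rows10 ((map_data.toList.take 70).take (2 * j))
                ++ [[String.ofList ((map_data.toList.drop (2 * j)).take 2)]]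
              = rows10 ((map_data.toList.take 70).take (2 * (j + 1))) := by
            rw [hstep, if_pos h5]
          rw [this, hrange]
          exact ihj
        · rw [if_neg (by
            intro h
            have : 2 * j % 10 / 2 = 0 := by exact_mod_cast h
            omega)]
          have htn : (((2 * j / 10 : Nat) : Int)).toNat = j / 5 := by
            rw [Int.toNat_natCast]; omega
          rw [htn]
          have : (rows10 ((map_data.toList.take 70).take (2 * j))).modify (j / 5)
                  (fun row => row ++ [String.ofList ((map_data.toList.drop (2 * j)).take 2)])
              = rows10 ((map_data.toList.take 70).take (2 * (j + 1))) := by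
            rw [hstep, if_neg h5]
          rw [this, hrange]
          exact ihj
    · rw [pyRange_step_nil _ _ 2 (by norm_num) (by exact_mod_cast not_lt.mp hc)]
      simp only [aLoop]
      apply congrArg
      apply List.take_of_length_le
      rw [List.length_take]
      omega

theorem mapRange_chunks2 : ∀ (row : List Char),
    (List.range ((row.length + 1) / 2)).map
      (fun k => String.ofList ((row.drop (2 * k)).take 2)) = chunks2 row
  | [] => by simp [chunks2]
  | [a] => by simp [chunks2, List.range_one]
  | a :: b :: rest => by
    have ih := mapRange_chunks2 rest
    have hc : ((a :: b :: rest).length + 1) / 2 = (rest.length + 1) / 2 + 1 := by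
      simp; omega
    rw [hc, List.range_succ_eq_map, List.map_cons, List.map_map, chunks2]
    have htail : List.map
        ((fun k => String.ofList (((a :: b :: rest).drop (2 * k)).take 2)) ∘ Nat.succ)
        (List.range ((rest.length + 1) / 2)) = chunks2 rest := by
      rw [← ih]
      apply List.map_congr_left; intro k _
      simp only [Function.comp_apply, Nat.succ_eq_add_one]
      rw [show 2 * (k + 1) = 2 * k + 1 + 1 from by omega, List.drop_succ_cons,
          List.drop_succ_cons]
    rw [htail]
    simp

theorem mapRange_rows10 (m : Nat) : ∀ (cs : List Char), cs.length ≤ 10 * m →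
    (List.range ((cs.length + 9) / 10)).map
      (fun k => chunks2 ((cs.drop (10 * k)).take 10)) = rows10 cs := by
  induction m with
  | zero =>
    intro cs h
    have : cs = [] := List.length_eq_zero_iff.mp (by omega)
    simp [this, rows10_nil]
  | succ m ih =>
    intro cs h
    by_cases hnil : cs = []
    · simp [hnil, rows10_nil]
    · have hl : 0 < cs.length := List.length_pos_iff.mpr hnil
      have ih' := ih (cs.drop 10) (by rw [List.length_drop]; omega)
      rw [List.length_drop] at ih'
      have hc : (cs.length + 9) / 10 = (cs.length - 10 + 9) / 10 + 1 := by omega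
      rw [hc, List.range_succ_eq_map, List.map_cons, List.map_map, rows10_cons cs hnil]
      have htail : List.map
          ((fun k => chunks2 ((cs.drop (10 * k)).take 10)) ∘ Nat.succ)
          (List.range ((cs.length - 10 + 9) / 10)) = rows10 (cs.drop 10) := by
        rw [← ih']
        apply List.map_congr_left; intro k _
        simp only [Function.comp_apply, Nat.succ_eq_add_one]
        rw [List.drop_drop, show 10 + 10 * k = 10 * (k + 1) from by omega]
      rw [htail]
      simp

theorem bChunkRow_eq (row : String) : bChunkRow row = chunks2 row.toList := by
  unfold bChunkRow
  rw [PySem.Str.len_eq, pyRangeTwo row.toList.length, List.map_map,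
      ← mapRange_chunks2 row.toList]
  apply List.map_congr_left; intro k _
  simp only [Function.comp_apply]
  have h := sliceStrMk row (2 * k) 2
  norm_num at h
  exact h

theorem alt_eq (s : String) : generate_map_matrix_alt s = rows10 (s.toList.take 70) := by
  have hdata : (PySem.Str.slice s none (some 70)).toList = s.toList.take 70 := by
    rw [PySem.Str.toList_slice]
    simp only [PySem.Chars.slice_eq_listSlice]
    rw [PySem.List.slice_to s.toList (by norm_num : (0:Int) ≤ 70)]
    congr 1
  unfold generate_map_matrix_alt
  simp only []
  rw [PySem.Str.len_eq, hdata, List.length_take,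
      show min 70 s.toList.length = (s.toList.take 70).length from by rw [List.length_take]]
  rw [pyRangeTen, List.map_map,
      ← mapRange_rows10 7 (s.toList.take 70) (by rw [List.length_take]; omega)]
  apply List.map_congr_left; intro k _
  simp only [Function.comp_apply]
  have h := sliceStrList (PySem.Str.slice s none (some 70)) (10 * k) 10
  rw [hdata] at h
  rw [show ((10 : Nat) : Int) = (10 : Int) from rfl] at h
  rw [bChunkRow_eq, h]

-- ===== VERDICT (by name: the statement is the Claim_ definition above) =====
theorem generate_map_matrix_spec : Claim_equal_generate_map_matrix := by
  intro s _
  unfold Spec_generate_map_matrix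
  rw [alt_eq]
  have h0 := aLoop_eq s 35 0 rfl
  simp only [Nat.mul_zero, List.take_zero, rows10_nil, Nat.cast_zero] at h0
  rw [generate_map_matrix, h0]
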